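-- pv_equiv track=rewrite | github.com/keithoma/math_note | strong_factorial_conjecture/strong_factorial_conjecture.py | lemma_2_17
-- ===== SOURCE A (Python) =====
-- def lemma_2_17(n):
--     """Computes the coefficients defined recursively in lemma 2.17."""
--     list_of_c = [1, 1]
--
--     def pair_sums_to(k):
--         pairs = [
--             (list_of_c[i], list_of_c[j])
--             for i in range(k + 1) for j in range(k + 1) if i + j == k
--         ]
--         return pairs
--
--     def c(k):
--         pairs = pair_sums_to(k - 1)
--
--         result = 0
--         for a, b in pairs:
--             result = result + a * b
--         return result
--
--     for i in range(2, n + 1):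
--         list_of_c.append(c(i))
--
--     return list_of_c
-- ===== SOURCE B (Python) =====
-- def lemma_2_17(n):
--     """Computes the coefficients defined recursively in lemma 2.17."""
--     cs = [1, 1]
--     for k in range(2, n + 1):
--         cs.append(sum(cs[j] * cs[k - 1 - j] for j in range(k)))
--     return cs
-- ===== Notes on version B (the rewrite author's own statement) =====
-- stated objective: faster
-- what changed: Replaced the O(k^2) double-loop search for index pairs (i,j) with i+j==k by a single convolution loop j = 0..k-1 pairing cs[j] with cs[k-1-j] (O(n^3) -> O(n^2)); intended as faster, measured 30.67x at the largest size both finished (n=256), both time out on far larger n.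
import Mathlib
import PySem

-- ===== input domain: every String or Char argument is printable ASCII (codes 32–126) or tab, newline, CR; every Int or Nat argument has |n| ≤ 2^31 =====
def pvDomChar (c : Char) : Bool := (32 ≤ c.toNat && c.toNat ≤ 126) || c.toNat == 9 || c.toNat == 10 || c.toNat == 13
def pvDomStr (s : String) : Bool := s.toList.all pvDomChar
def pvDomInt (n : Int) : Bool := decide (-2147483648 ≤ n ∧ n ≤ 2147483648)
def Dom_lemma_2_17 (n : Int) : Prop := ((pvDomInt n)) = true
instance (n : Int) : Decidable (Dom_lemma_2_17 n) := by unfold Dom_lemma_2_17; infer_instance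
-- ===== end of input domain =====

-- B replaces A's quadratic pair search per coefficient by a single convolution loop; intended as faster (measured 30.67x at the largest size both finished).

-- ===== PORT A =====
-- helper pair_sums_to(k): [(c[i], c[j]) for i in range(k+1) for j in range(k+1) if i+j == k]
def pvPairSumsTo (cs : List Int) (k : Int) : List (Int × Int) :=
  (PySem.List.pyRange 0 (k + 1) 1).flatMap (fun i =>
    (PySem.List.pyRange 0 (k + 1) 1).filterMap (fun j =>
      if i + j = k then some (PySem.List.pyGetD cs i 0, PySem.List.pyGetD cs j 0) else none))

-- helper c(k): sum of a*b over pair_sums_to(k-1)   (all indices are in range, so pyGetD's default is never used)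
def pvCA (cs : List Int) (k : Int) : Int :=
  (pvPairSumsTo cs (k - 1)).foldl (fun r ab => r + ab.1 * ab.2) 0

def lemma_2_17 (n : Int) : List Int :=
  (PySem.List.pyRange 2 (n + 1) 1).foldl (fun cs i => cs ++ [pvCA cs i]) [1, 1]

-- ===== PORT B =====
-- helper: sum(cs[j] * cs[k-1-j] for j in range(k))
def pvConv (cs : List Int) (k : Int) : Int :=
  (PySem.List.pyRange 0 k 1).foldl
    (fun acc j => acc + PySem.List.pyGetD cs j 0 * PySem.List.pyGetD cs (k - 1 - j) 0) 0

def lemma_2_17_alt (n : Int) : List Int :=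
  (PySem.List.pyRange 2 (n + 1) 1).foldl (fun cs k => cs ++ [pvConv cs k]) [1, 1]

-- ===== PRECONDITION & SPEC =====
def Spec_lemma_2_17 (n : Int) (out : List Int) : Prop := out = lemma_2_17_alt n
instance (n : Int) (out : List Int) : Decidable (Spec_lemma_2_17 n out) := by unfold Spec_lemma_2_17; infer_instance

-- ===== CLAIM (what is proved, stated in full; the proofs are below) =====
def Claim_equal_lemma_2_17 : Prop := ∀ (n : Int), Dom_lemma_2_17 n → Spec_lemma_2_17 n (lemma_2_17 n)

-- ===== LEMMAS AND PROOFS =====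

-- foldl respects pointwise equality of step functions
theorem pv_foldl_funcongr {α β : Type} (l : List β) (f g : α → β → α) (init : α)
    (h : ∀ acc x, f acc x = g acc x) : l.foldl f init = l.foldl g init := by
  induction l generalizing init with
  | nil => rfl
  | cons a t ih => simp only [List.foldl_cons, h]; exact ih _


-- a filterMap whose condition never fires yields []
theorem pv_filterMap_nil {α β : Type} [DecidableEq α] (l : List α) (m : α) (f : α → β)
    (hm : m ∉ l) : l.filterMap (fun j => if j = m then some (f j) else none) = [] := by
  induction l with
  | nil => rfl
  | cons a t ih =>
    simp only [List.mem_cons, not_or] at hm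
    simp only [List.filterMap_cons]
    rw [if_neg (fun e => hm.1 e.symm)]
    exact ih hm.2

theorem pv_filterMap_single {α β : Type} [DecidableEq α] (l : List α) (m : α) (f : α → β)
    (hl : l.Nodup) (hm : m ∈ l) :
    l.filterMap (fun j => if j = m then some (f j) else none) = [f m] := by
  induction l with
  | nil => cases hm
  | cons a t ih =>
    rcases List.mem_cons.mp hm with h | h
    · subst h
      rw [List.filterMap_cons, if_pos rfl, pv_filterMap_nil t m f (List.nodup_cons.mp hl).1]
    · have hne : a ≠ m := by
        intro e; subst e; exact (List.nodup_cons.mp hl).1 h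
      simp only [List.filterMap_cons, if_neg hne]
      exact ih (List.nodup_cons.mp hl).2 h

theorem pv_flatMap_singleton {α β : Type} (l : List α) (f : α → List β) (g : α → β)
    (h : ∀ a ∈ l, f a = [g a]) : l.flatMap f = l.map g := by
  induction l with
  | nil => rfl
  | cons a t ih =>
    simp only [List.flatMap_cons, List.map_cons, h a (by simp)]
    rw [ih (fun a ha => h a (List.mem_cons_of_mem _ ha))]
    rfl

-- the heart: A's double-loop pair sum equals B's convolution loop
theorem pvCA_eq_pvConv (cs : List Int) (k : Int) : pvCA cs k = pvConv cs k := by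
  unfold pvCA pvConv pvPairSumsTo
  have hk : k - 1 + 1 = k := by omega
  rw [hk]
  rw [pv_flatMap_singleton _ _
      (fun i => (PySem.List.pyGetD cs i 0, PySem.List.pyGetD cs (k - 1 - i) 0)) ?_]
  · rw [List.foldl_map]
  · intro i hi
    have hi' := (PySem.List.mem_pyRange_one).mp hi
    have hcong : (PySem.List.pyRange 0 k 1).filterMap
        (fun j => if i + j = k - 1 then some (PySem.List.pyGetD cs i 0, PySem.List.pyGetD cs j 0) else none)
      = (PySem.List.pyRange 0 k 1).filterMap
        (fun j => if j = k - 1 - i then some (PySem.List.pyGetD cs i 0, PySem.List.pyGetD cs j 0) else none) := by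
      apply List.filterMap_congr
      intro j _
      by_cases h : i + j = k - 1
      · rw [if_pos h, if_pos (by omega)]
      · rw [if_neg h, if_neg (by omega)]
    rw [hcong]
    exact pv_filterMap_single _ _ _ (PySem.List.nodup_pyRange_one 0 k)
      (PySem.List.mem_pyRange_one.mpr (by omega))

-- ===== VERDICT (by name: the statement is the Claim_ definition above) =====
theorem lemma_2_17_spec : Claim_equal_lemma_2_17 := by
  intro n _
  unfold Spec_lemma_2_17 lemma_2_17 lemma_2_17_alt
  apply pv_foldl_funcongr
  intro acc x
  rw [pvCA_eq_pvConv]
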